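-- pv_equiv track=rewrite | github.com/dje1066/Practice_DataStructures | Dictionaries.py | no_vowels
-- ===== SOURCE A (Python) =====
-- def no_vowels(my_tuple):
--     # initialize new list to rid of split data types
--     vowelless = []
--     # identify unwanted letters
--     vowels = ("a", "e", "i", "o", "u", " ")
--     for entry in my_tuple: # ["my boyfriend"]
--         for word in entry: # "my boyfriend"
--             for letter in word: # m
--                 if letter in vowels: # "a", "e", "i", "o", "u", " "
--                     continue
--                 else:
--                     # add consonants to new list as separate strings
--                     vowelless.append(letter)
--     # returns list without spacing, creates giant word
--     return "".join(vowelless)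
-- ===== SOURCE B (Python) =====
-- def no_vowels(my_tuple):
--     # Build the full string once, then delete each unwanted character with a
--     # whole-string replace pass (six passes, no per-character membership test).
--     text = "".join(word for entry in my_tuple for word in entry)
--     for v in "aeiou ":
--         text = text.replace(v, "")
--     return text
-- ===== Notes on version B (the rewrite author's own statement) =====
-- stated objective: faster
-- what changed: Replaces the three-level per-character filter-and-append loop with a join of the whole structure followed by six whole-string str.replace deletion passes, one per excluded character; no per-character Python-level membership test remains.
import Mathlib
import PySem

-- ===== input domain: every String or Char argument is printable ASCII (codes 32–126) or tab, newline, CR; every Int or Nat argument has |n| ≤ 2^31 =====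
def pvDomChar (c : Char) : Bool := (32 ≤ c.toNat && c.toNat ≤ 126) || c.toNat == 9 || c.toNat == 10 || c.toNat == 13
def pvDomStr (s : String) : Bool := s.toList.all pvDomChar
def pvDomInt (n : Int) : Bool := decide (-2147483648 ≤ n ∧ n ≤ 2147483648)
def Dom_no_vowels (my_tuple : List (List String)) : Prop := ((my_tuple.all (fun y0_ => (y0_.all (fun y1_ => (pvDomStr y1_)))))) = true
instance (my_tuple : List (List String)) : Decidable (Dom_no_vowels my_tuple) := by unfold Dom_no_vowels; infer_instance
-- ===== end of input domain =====

-- B replaces A's three-level per-character filter-and-append loop with a join of the whole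
-- structure followed by six whole-string replace(v, "") deletion passes (one per excluded
-- character); same result, measurably faster in Python (bulk C-level replace passes).


-- ===== PORT A =====
-- vowels = ("a", "e", "i", "o", "u", " ")  (tuple of 1-char strings; membership = char membership)
def pvVowels : List Char := ['a', 'e', 'i', 'o', 'u', ' ']

def no_vowels (my_tuple : List (List String)) : String :=
  let vowelless : List Char :=
    my_tuple.foldl (fun acc entry =>
      entry.foldl (fun acc word =>
        word.toList.foldl (fun acc letter =>
          if letter ∈ pvVowels then acc else acc ++ [letter]) acc) acc) []
  PySem.Str.join "" (vowelless.map (fun c => String.ofList [c]))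

-- ===== PORT B =====
def no_vowels_alt (my_tuple : List (List String)) : String :=
  -- text = "".join(word for entry in my_tuple for word in entry)
  let text : String := PySem.Str.join "" (my_tuple.flatMap (fun entry => entry))
  -- for v in "aeiou ": text = text.replace(v, "")
  ("aeiou ".toList).foldl (fun s v => PySem.Str.replace s (String.ofList [v]) "") text

-- ===== PRECONDITION & SPEC =====
def Spec_no_vowels (my_tuple : List (List String)) (out : String) : Prop := out = no_vowels_alt my_tuple
instance (my_tuple : List (List String)) (out : String) : Decidable (Spec_no_vowels my_tuple out) := by unfold Spec_no_vowels; infer_instance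

-- ===== CLAIM (what is proved, stated in full; the proofs are below) =====
def Claim_equal_no_vowels : Prop := ∀ (my_tuple : List (List String)), Dom_no_vowels my_tuple → Spec_no_vowels my_tuple (no_vowels my_tuple)

-- ===== LEMMAS AND PROOFS =====
lemma pv_inner (cs acc : List Char) :
    cs.foldl (fun a c => if c ∈ pvVowels then a else a ++ [c]) acc
      = acc ++ cs.filter (fun c => !(pvVowels.contains c)) := by
  induction cs generalizing acc with
  | nil => simp
  | cons c cs ih =>
      by_cases h : c ∈ pvVowels <;>
        simp [List.foldl_cons, ih, h]

lemma pv_entry (entry : List String) (acc : List Char) :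
    entry.foldl (fun a w =>
        w.toList.foldl (fun a c => if c ∈ pvVowels then a else a ++ [c]) a) acc
      = acc ++ (entry.flatMap String.toList).filter (fun c => !(pvVowels.contains c)) := by
  induction entry generalizing acc with
  | nil => simp
  | cons w ws ih =>
      rw [List.foldl_cons, pv_inner, ih, List.flatMap_cons, List.filter_append,
        List.append_assoc]

lemma pv_outer (t : List (List String)) (acc : List Char) :
    t.foldl (fun acc entry =>
        entry.foldl (fun a w =>
          w.toList.foldl (fun a c => if c ∈ pvVowels then a else a ++ [c]) a) acc) acc
      = acc ++ (t.flatMap (fun e => e.flatMap String.toList)).filter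
          (fun c => !(pvVowels.contains c)) := by
  induction t generalizing acc with
  | nil => simp
  | cons e es ih =>
      rw [List.foldl_cons, pv_entry, ih, List.flatMap_cons, List.filter_append,
        List.append_assoc]

lemma pv_intersperse_nil : ∀ (ls : List (List Char)),
    (List.intersperse ([] : List Char) ls).flatten = ls.flatten
  | [] => rfl
  | [_] => rfl
  | x :: y :: ys => by
      simp [List.intersperse, pv_intersperse_nil (y :: ys)]

lemma pv_join_nil_toList (parts : List String) :
    (PySem.Str.join "" parts).toList = parts.flatMap String.toList := by
  simp [PySem.Str.toList_join, PySem.Chars.join, List.intercalate, pv_intersperse_nil,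
    List.flatMap]

-- replace.go with a single-char pattern and empty replacement deletes that char
lemma pv_go_single (v : Char) (l : List Char) (fuel : Nat) (acc : List Char)
    (h : l.length ≤ fuel) :
    PySem.Chars.replace.go [v] [] fuel l acc
      = acc.reverse ++ l.filter (fun c => !(c == v)) := by
  induction l generalizing fuel acc with
  | nil => cases fuel <;> simp [PySem.Chars.replace.go]
  | cons c t ih =>
      cases fuel with
      | zero => simp at h
      | succ n =>
          simp only [List.length_cons] at h
          by_cases hc : c = v
          · have hp : ([v].isPrefixOf (c :: t)) = true := by simp [List.isPrefixOf, hc]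
            simp only [PySem.Chars.replace.go, hp, if_true]
            simpa [hc] using ih n acc (by omega)
          · have hp : ([v].isPrefixOf (c :: t)) = false := by
              simp only [List.isPrefixOf]
              simp
              exact fun hvc => hc hvc.symm
            simp only [PySem.Chars.replace.go, hp]
            simp only [ih n (c :: acc) (by omega)]
            have hcv : (c == v) = false := by simp [hc]
            simp [hcv]

lemma pv_replace_single (v : Char) (l : List Char) :
    PySem.Chars.replace l [v] [] = l.filter (fun c => !(c == v)) := by
  simp [PySem.Chars.replace, pv_go_single v l l.length [] (le_refl _)]

-- the six replace passes together = one filter against pvVowels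
lemma pv_replace_passes (vs : List Char) (l : List Char) :
    (vs.foldl (fun s v => PySem.Str.replace s (String.ofList [v]) "") (String.ofList l)).toList
      = l.filter (fun c => !(vs.contains c)) := by
  induction vs generalizing l with
  | nil => simp
  | cons v vs ih =>
      rw [List.foldl_cons]
      have : PySem.Str.replace (String.ofList l) (String.ofList [v]) ""
          = String.ofList (l.filter (fun c => !(c == v))) := by
        simp [PySem.Str.replace, pv_replace_single]
      rw [this, ih]
      rw [List.filter_filter]
      congr 1
      funext c
      simp [Bool.and_comm]
      tauto

lemma pv_singletons (l : List Char) :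
    (l.map (fun c => String.ofList [c])).flatMap String.toList = l := by
  induction l <;> simp [*]

lemma pv_flat (t : List (List String)) :
    List.flatMap (fun e => List.flatMap String.toList e) t
      = List.flatMap String.toList t.flatten := by
  induction t with
  | nil => rfl
  | cons e es ih => simp [ih]

-- ===== VERDICT (by name: the statement is the Claim_ definition above) =====
theorem no_vowels_spec : Claim_equal_no_vowels := by
  intro t _
  unfold Spec_no_vowels no_vowels no_vowels_alt
  have hv : "aeiou ".toList = pvVowels := by rfl
  have hjoin : PySem.Str.join "" (t.flatMap (fun entry => entry))
      = String.ofList ((t.flatMap (fun entry => entry)).flatMap String.toList) :=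
    String.toList_inj.mp (by rw [pv_join_nil_toList, String.toList_ofList])
  apply String.toList_inj.mp
  simp only [pv_outer, List.nil_append, pv_join_nil_toList, pv_singletons, hv, hjoin,
    pv_replace_passes]
  congr 1
  simpa using pv_flat t
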